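-- pv_equiv track=rewrite | github.com/abhayror17/Videlo | backend/app/services/credit_system.py | get_closest_resolution_key
-- ===== SOURCE A (Python) =====
-- from typing import Dict, Optional, Tuple
--
-- def get_closest_resolution_key(pricing: dict, width: int, height: int) -> Optional[Tuple[int, int]]:
--     """Find the closest resolution key that fits the requested dimensions."""
--     for (w, h), credits in sorted(pricing.items()):
--         if width <= w and height <= h:
--             return (w, h), credits
--     # Return max resolution if nothing fits
--     if pricing:
--         max_key = max(pricing.keys(), key=lambda x: x[0] * x[1])
--         return max_key, pricing[max_key]
--     return None, None
-- ===== SOURCE B (Python) =====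
-- def get_closest_resolution_key(pricing: dict, width: int, height: int):
--     """Single pass, no sort: track the lexicographically smallest fitting item
--     and the first maximum-area item simultaneously."""
--     best = None      # minimal fitting ((w, h), credits) under tuple order
--     biggest = None   # first item whose w*h is maximal
--     for (w, h), credits in pricing.items():
--         item = ((w, h), credits)
--         if width <= w and height <= h and (best is None or item < best):
--             best = item
--         if biggest is None or w * h > biggest[0][0] * biggest[0][1]:
--             biggest = item
--     chosen = best if best is not None else biggest
--     if chosen is None:
--         return None, None
--     return chosen
-- ===== Notes on version B (the rewrite author's own statement) =====
-- stated objective: alternative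
-- what changed: Replaces sort-then-scan (plus a separate max pass and dict lookup in the fallback) by a single O(n) pass that tracks the lexicographically smallest fitting item and the first maximum-area item.
import Mathlib
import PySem

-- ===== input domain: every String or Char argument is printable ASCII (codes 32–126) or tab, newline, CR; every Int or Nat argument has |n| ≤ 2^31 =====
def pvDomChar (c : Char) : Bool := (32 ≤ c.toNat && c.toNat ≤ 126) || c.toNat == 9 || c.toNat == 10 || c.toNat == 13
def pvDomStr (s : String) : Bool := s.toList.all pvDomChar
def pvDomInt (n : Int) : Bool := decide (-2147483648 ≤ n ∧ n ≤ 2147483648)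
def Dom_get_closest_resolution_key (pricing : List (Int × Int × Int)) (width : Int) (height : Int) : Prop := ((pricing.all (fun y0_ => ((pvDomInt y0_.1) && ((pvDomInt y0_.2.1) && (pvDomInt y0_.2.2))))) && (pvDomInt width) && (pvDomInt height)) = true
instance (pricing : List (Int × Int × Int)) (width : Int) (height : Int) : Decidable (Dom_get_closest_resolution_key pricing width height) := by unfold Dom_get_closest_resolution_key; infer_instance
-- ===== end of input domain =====

-- B replaces A's sort-then-scan (plus a separate max pass and dict lookup) by a single pass tracking
-- the lexicographically smallest fitting item and the first maximum-area item (alternative algorithm, same values).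

-- ===== PORT A =====
-- Python sorts the ((w,h),credits) tuples by full lexicographic tuple order; the key
-- pvTupKey embeds the items ((w,h),c) into the lexicographic product order, so
-- PySem.List.sorted with this key is exactly Python's sorted(pricing.items()).
def pvTupKey (t : Int × Int × Int) : Int ×ₗ (Int ×ₗ Int) := toLex (t.1, toLex (t.2.1, t.2.2))

-- the loop: first sorted item with width <= w and height <= h
def pvFindFit (width height : Int) : List (Int × Int × Int) → Option (Int × Int × Int)
  | [] => none
  | t :: rest => if width ≤ t.1 ∧ height ≤ t.2.1 then some t else pvFindFit width height rest

-- pricing[max_key]: first-match association-list lookup (exact: dict keys are unique)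
def pvLookup (k : Int × Int) : List (Int × Int × Int) → Option Int
  | [] => none
  | t :: rest => if (t.1, t.2.1) = k then some t.2.2 else pvLookup k rest

def get_closest_resolution_key (pricing : List (Int × Int × Int)) (width : Int) (height : Int) : (Option (Int × Int)) × Option Int :=
  match pvFindFit width height (PySem.List.sorted pricing pvTupKey false) with
  | some t => (some (t.1, t.2.1), some t.2.2)
  | none =>
    -- max? = none exactly when pricing is empty, i.e. the `if pricing:` guard fails
    match PySem.List.max? (pricing.map (fun t => (t.1, t.2.1))) (fun k => k.1 * k.2) with
    | some k => (some k, pvLookup k pricing)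
    | none => (none, none)

-- ===== PORT B =====
-- Python tuple comparison item < best, written out on the components
def pvLexLt (a b : Int × Int × Int) : Bool :=
  a.1 < b.1 || (a.1 == b.1 && (a.2.1 < b.2.1 || (a.2.1 == b.2.1 && a.2.2 < b.2.2)))

def pvStep (width height : Int)
    (st : Option (Int × Int × Int) × Option (Int × Int × Int)) (t : Int × Int × Int) :
    Option (Int × Int × Int) × Option (Int × Int × Int) :=
  let best :=
    if (decide (width ≤ t.1) && decide (height ≤ t.2.1)
        && (match st.1 with | none => true | some b => pvLexLt t b)) = true
    then some t else st.1
  let biggest :=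
    match st.2 with
    | none => some t
    | some g => if t.1 * t.2.1 > g.1 * g.2.1 then some t else some g
  (best, biggest)

def get_closest_resolution_key_alt (pricing : List (Int × Int × Int)) (width : Int) (height : Int) : (Option (Int × Int)) × Option Int :=
  let r := pricing.foldl (pvStep width height) (none, none)
  let chosen := match r.1 with | some b => some b | none => r.2
  match chosen with
  | none => (none, none)
  | some t => (some (t.1, t.2.1), some t.2.2)

-- ===== PRECONDITION & SPEC =====
def Spec_get_closest_resolution_key (pricing : List (Int × Int × Int)) (width : Int) (height : Int) (out : (Option (Int × Int)) × Option Int) : Prop := out = get_closest_resolution_key_alt pricing width height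
instance (pricing : List (Int × Int × Int)) (width : Int) (height : Int) (out : (Option (Int × Int)) × Option Int) : Decidable (Spec_get_closest_resolution_key pricing width height out) := by unfold Spec_get_closest_resolution_key; infer_instance

-- ===== CLAIM (what is proved, stated in full; the proofs are below) =====
def Claim_equal_get_closest_resolution_key : Prop := ∀ (pricing : List (Int × Int × Int)) (width : Int) (height : Int), Dom_get_closest_resolution_key pricing width height → Spec_get_closest_resolution_key pricing width height (get_closest_resolution_key pricing width height)

-- ===== LEMMAS AND PROOFS =====

theorem pvTupKey_inj : Function.Injective pvTupKey := by
  intro a b h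
  simp only [pvTupKey] at h
  have h1 := congrArg (fun x => (ofLex x).1) h
  have h2 := congrArg (fun x => (ofLex (ofLex x).2).1) h
  have h3 := congrArg (fun x => (ofLex (ofLex x).2).2) h
  simp at h1 h2 h3
  exact Prod.ext h1 (Prod.ext h2 h3)

theorem pvLexLt_iff (a b : Int × Int × Int) : pvLexLt a b = true ↔ pvTupKey a < pvTupKey b := by
  simp [pvLexLt, pvTupKey, Prod.Lex.toLex_lt_toLex]

theorem pvFindFit_none (width height : Int) (l : List (Int × Int × Int)) :
    pvFindFit width height l = none ↔ ∀ t ∈ l, ¬ (width ≤ t.1 ∧ height ≤ t.2.1) := by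
  induction l with
  | nil => simp [pvFindFit]
  | cons t rest ih =>
    simp only [pvFindFit]
    split <;> simp_all

theorem pvFindFit_some (width height : Int) (l : List (Int × Int × Int)) (x : Int × Int × Int)
    (h : pvFindFit width height l = some x) : x ∈ l ∧ width ≤ x.1 ∧ height ≤ x.2.1 := by
  induction l with
  | nil => simp [pvFindFit] at h
  | cons t rest ih =>
    simp only [pvFindFit] at h
    split at h
    · cases h; simp_all
    · have := ih h; simp_all

theorem pvFindFit_min (width height : Int) (l : List (Int × Int × Int))
    (hp : l.Pairwise (fun a b => pvTupKey a ≤ pvTupKey b)) (x : Int × Int × Int)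
    (h : pvFindFit width height l = some x) :
    ∀ z ∈ l, (width ≤ z.1 ∧ height ≤ z.2.1) → pvTupKey x ≤ pvTupKey z := by
  induction l with
  | nil => simp [pvFindFit] at h
  | cons t rest ih =>
    simp only [pvFindFit] at h
    rcases List.pairwise_cons.mp hp with ⟨hle, hp'⟩
    split at h
    · cases h
      intro z hz _
      rcases List.mem_cons.mp hz with rfl | hz
      · exact le_refl _
      · exact hle z hz
    · intro z hz hfit
      rcases List.mem_cons.mp hz with rfl | hz
      · exact absurd hfit (by assumption)
      · exact ih hp' h z hz hfit

-- B's best component factors into a min-fold over the fitting items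
def pvMinStep (m : Option (Int × Int × Int)) (t : Int × Int × Int) : Option (Int × Int × Int) :=
  match m with
  | none => some t
  | some b => if pvLexLt t b then some t else some b

theorem pvBest_factor (width height : Int) (l : List (Int × Int × Int))
    (acc : Option (Int × Int × Int) × Option (Int × Int × Int)) :
    (l.foldl (pvStep width height) acc).1 =
      (l.filter (fun t => decide (width ≤ t.1) && decide (height ≤ t.2.1))).foldl pvMinStep acc.1 := by
  induction l generalizing acc with
  | nil => rfl
  | cons t rest ih =>
    simp only [List.foldl_cons, List.filter_cons, ih]
    by_cases hf : (decide (width ≤ t.1) && decide (height ≤ t.2.1)) = true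
    · rw [if_pos hf]
      simp only [List.foldl_cons]
      congr 1
      simp only [pvStep, pvMinStep, hf, Bool.true_and]
      match h : acc.1 with
      | none => simp
      | some b => by_cases hlt : pvLexLt t b = true <;> simp [hlt]
    · rw [if_neg hf]
      congr 1
      simp only [pvStep]
      rw [if_neg (by simp [hf])]

theorem pvMinFold_none (l : List (Int × Int × Int)) (m : Option (Int × Int × Int)) :
    l.foldl pvMinStep m = none ↔ m = none ∧ l = [] := by
  induction l generalizing m with
  | nil => simp
  | cons t rest ih =>
    simp only [List.foldl_cons, ih]
    constructor
    · rintro ⟨h, -⟩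
      exfalso
      cases m with
      | none => simp [pvMinStep] at h
      | some b => simp only [pvMinStep] at h; split at h <;> simp_all
    · rintro ⟨-, h⟩; simp at h

theorem pvMinFold_some (l : List (Int × Int × Int)) (m : Option (Int × Int × Int))
    (x : Int × Int × Int) (h : l.foldl pvMinStep m = some x) :
    (x ∈ l ∨ m = some x) ∧ (∀ z ∈ l, pvTupKey x ≤ pvTupKey z) ∧
      (∀ b, m = some b → pvTupKey x ≤ pvTupKey b) := by
  induction l generalizing m with
  | nil =>
    simp only [List.foldl_nil] at h
    exact ⟨Or.inr h, by simp, fun b hb => by rw [h] at hb; cases hb; exact le_refl _⟩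
  | cons t rest ih =>
    simp only [List.foldl_cons] at h
    obtain ⟨hmem, hmin, hacc⟩ := ih (pvMinStep m t) h
    have hstep : ∃ c, pvMinStep m t = some c ∧ pvTupKey c ≤ pvTupKey t ∧
        (∀ b, m = some b → pvTupKey c ≤ pvTupKey b) ∧ (c = t ∨ m = some c) := by
      match hm : m with
      | none => exact ⟨t, rfl, le_refl _, by simp, Or.inl rfl⟩
      | some b =>
        simp only [pvMinStep]
        by_cases hlt : pvLexLt t b = true
        · exact ⟨t, by rw [if_pos hlt], le_refl _,
            fun b' hb' => by cases hb'; exact le_of_lt ((pvLexLt_iff t b).mp hlt), Or.inl rfl⟩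
        · refine ⟨b, by rw [if_neg hlt], ?_, fun b' hb' => by cases hb'; exact le_refl _, Or.inr rfl⟩
          exact le_of_not_gt (fun hc => hlt ((pvLexLt_iff t b).mpr hc))
    obtain ⟨c, hc, hct, hcb, hcm⟩ := hstep
    have hxc := hacc c hc
    refine ⟨?_, ?_, fun b hb => le_trans hxc (hcb b hb)⟩
    · rcases hmem with hx | hx
      · exact Or.inl (List.mem_cons_of_mem _ hx)
      · rw [hc] at hx; cases hx
        rcases hcm with rfl | hm
        · exact Or.inl (List.mem_cons_self)
        · exact Or.inr hm
    · intro z hz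
      rcases List.mem_cons.mp hz with rfl | hz
      · exact le_trans hxc hct
      · exact hmin z hz

-- B's biggest component: the first-maximum-area fold
def pvMaxStep (m : Option (Int × Int × Int)) (x : Int × Int × Int) : Option (Int × Int × Int) :=
  match m with
  | none => some x
  | some g => if g.1 * g.2.1 < x.1 * x.2.1 then some x else some g

theorem pvBig_factor (width height : Int) (l : List (Int × Int × Int))
    (acc : Option (Int × Int × Int) × Option (Int × Int × Int)) :
    (l.foldl (pvStep width height) acc).2 = l.foldl pvMaxStep acc.2 := by
  induction l generalizing acc with
  | nil => rfl
  | cons t rest ih =>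
    simp only [List.foldl_cons, ih]
    congr 1

-- A's max? over the keys = key of B's first-maximum fold over the items
theorem pvMax?_map_aux (l : List (Int × Int × Int)) (acc : Option (Int × Int × Int)) :
    (l.map (fun t => (t.1, t.2.1))).foldl
      (fun acc x => match acc with
        | none => some x
        | some m => if (fun k : Int × Int => k.1 * k.2) m < (fun k : Int × Int => k.1 * k.2) x then some x else some m)
      (acc.map (fun t => (t.1, t.2.1))) =
    (l.foldl pvMaxStep acc).map (fun t => (t.1, t.2.1)) := by
  induction l generalizing acc with
  | nil => rfl
  | cons t rest ih =>
    simp only [List.map_cons, List.foldl_cons]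
    rw [← ih]
    congr 1
    match acc with
    | none => rfl
    | some g => simp only [Option.map_some, pvMaxStep]; split <;> rfl

theorem pvMax?_map (l : List (Int × Int × Int)) :
    PySem.List.max? (l.map (fun t => (t.1, t.2.1))) (fun k : Int × Int => k.1 * k.2) =
      (l.foldl pvMaxStep none).map (fun t => (t.1, t.2.1)) := by
  have h := pvMax?_map_aux l none
  unfold PySem.List.max?
  convert h using 2
  funext acc x
  cases acc with
  | none => rfl
  | some m => exact if_congr Iff.rfl rfl rfl

theorem pvMaxFold_some (l : List (Int × Int × Int)) (a : Int × Int × Int) :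
    ∃ g, l.foldl pvMaxStep (some a) = some g := by
  induction l generalizing a with
  | nil => exact ⟨a, rfl⟩
  | cons t rest ih =>
    simp only [List.foldl_cons, pvMaxStep]
    split
    · exact ih t
    · exact ih a

-- the first-maximum fold lands on an item all of whose predecessors have strictly smaller area
theorem pvMaxFold_split (l : List (Int × Int × Int)) (a g : Int × Int × Int)
    (h : l.foldl pvMaxStep (some a) = some g) :
    g = a ∨ ∃ l1 l2, l = l1 ++ g :: l2 ∧ a.1 * a.2.1 < g.1 * g.2.1 ∧
      ∀ z ∈ l1, z.1 * z.2.1 < g.1 * g.2.1 := by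
  induction l generalizing a with
  | nil =>
    simp only [List.foldl_nil, Option.some.injEq] at h
    exact Or.inl h.symm
  | cons t rest ih =>
    simp only [List.foldl_cons, pvMaxStep] at h
    by_cases hlt : a.1 * a.2.1 < t.1 * t.2.1
    · rw [if_pos hlt] at h
      rcases ih t h with hg | ⟨l1, l2, hsplit, hgt, hall⟩
      · subst hg
        exact Or.inr ⟨[], rest, rfl, hlt, by simp⟩
      · refine Or.inr ⟨t :: l1, l2, by simp [hsplit], lt_trans hlt hgt, ?_⟩
        intro z hz
        rcases List.mem_cons.mp hz with rfl | hz
        · exact hgt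
        · exact hall z hz
    · rw [if_neg hlt] at h
      rcases ih a h with hg | ⟨l1, l2, hsplit, hgt, hall⟩
      · exact Or.inl hg
      · refine Or.inr ⟨t :: l1, l2, by simp [hsplit], hgt, ?_⟩
        intro z hz
        rcases List.mem_cons.mp hz with rfl | hz
        · exact lt_of_le_of_lt (not_lt.mp hlt) hgt
        · exact hall z hz

-- lookup of the chosen key hits exactly the chosen item
theorem pvLookup_append (k : Int × Int) (l1 l2 : List (Int × Int × Int)) (g : Int × Int × Int)
    (hk : (g.1, g.2.1) = k) (hall : ∀ z ∈ l1, (z.1, z.2.1) ≠ k) :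
    pvLookup k (l1 ++ g :: l2) = some g.2.2 := by
  induction l1 with
  | nil => simp [pvLookup, hk]
  | cons t rest ih =>
    simp only [List.cons_append, pvLookup]
    rw [if_neg (hall t (by simp))]
    exact ih (fun z hz => hall z (by simp [hz]))

-- the fallback item is the first occurrence of its own key, so the dict lookup returns its credits
theorem pvLookup_of_maxfold (l : List (Int × Int × Int)) (g : Int × Int × Int)
    (h : l.foldl pvMaxStep none = some g) : pvLookup (g.1, g.2.1) l = some g.2.2 := by
  match l with
  | [] => simp at h
  | p :: rest =>
    have h' : rest.foldl pvMaxStep (some p) = some g := h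
    rcases pvMaxFold_split rest p g h' with rfl | ⟨l1, l2, hsplit, hgt, hall⟩
    · exact pvLookup_append _ [] rest g rfl (by simp)
    · rw [hsplit]
      refine pvLookup_append _ (p :: l1) l2 g rfl ?_
      intro z hz hk
      have harea : z.1 * z.2.1 = g.1 * g.2.1 := by
        obtain ⟨h1, h2⟩ := Prod.ext_iff.mp hk
        simp only at h1 h2
        rw [h1, h2]
      rcases List.mem_cons.mp hz with rfl | hz
      · exact absurd harea (ne_of_lt hgt)
      · exact absurd harea (ne_of_lt (hall z hz))

-- A's fitting branch agrees with B's min-fold: both are THE minimal fitting item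
theorem pv_fit_agree (pricing : List (Int × Int × Int)) (width height : Int)
    (x : Int × Int × Int)
    (hA : pvFindFit width height (PySem.List.sorted pricing pvTupKey false) = some x) :
    (pricing.filter (fun t => decide (width ≤ t.1) && decide (height ≤ t.2.1))).foldl pvMinStep none = some x := by
  obtain ⟨hxS, hxw, hxh⟩ := pvFindFit_some width height _ x hA
  have hxl : x ∈ pricing := (PySem.List.mem_sorted pricing pvTupKey false x).mp hxS
  have hxf : x ∈ pricing.filter (fun t => decide (width ≤ t.1) && decide (height ≤ t.2.1)) := by
    simp [List.mem_filter, hxl, hxw, hxh]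
  match hy : (pricing.filter (fun t => decide (width ≤ t.1) && decide (height ≤ t.2.1))).foldl pvMinStep none with
  | none =>
    exfalso
    have := (pvMinFold_none _ none).mp hy
    rw [this.2] at hxf
    simp at hxf
  | some y =>
    obtain ⟨hmem, hmin, -⟩ := pvMinFold_some _ none y hy
    have hyf : y ∈ pricing.filter (fun t => decide (width ≤ t.1) && decide (height ≤ t.2.1)) := by
      rcases hmem with h | h
      · exact h
      · cases h
    have hyl : y ∈ pricing := (List.mem_filter.mp hyf).1
    have hyfit : width ≤ y.1 ∧ height ≤ y.2.1 := by
      have := (List.mem_filter.mp hyf).2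
      simp at this
      exact this
    have hyS : y ∈ PySem.List.sorted pricing pvTupKey false :=
      (PySem.List.mem_sorted pricing pvTupKey false y).mpr hyl
    have h1 : pvTupKey x ≤ pvTupKey y :=
      pvFindFit_min width height _ (PySem.List.sorted_pairwise pricing pvTupKey) x hA y hyS hyfit
    have h2 : pvTupKey y ≤ pvTupKey x := hmin x hxf
    have : x = y := pvTupKey_inj (le_antisymm h1 h2)
    rw [this]; exact hy

-- ===== VERDICT (by name: the statement is the Claim_ definition above) =====
theorem get_closest_resolution_key_spec : Claim_equal_get_closest_resolution_key := by
  intro pricing width height _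
  unfold Spec_get_closest_resolution_key
  unfold get_closest_resolution_key get_closest_resolution_key_alt
  simp only []
  match hA : pvFindFit width height (PySem.List.sorted pricing pvTupKey false) with
  | some x =>
    have hb1 : (pricing.foldl (pvStep width height) (none, none)).1 = some x := by
      rw [pvBest_factor]
      exact pv_fit_agree pricing width height x hA
    rw [hb1]
  | none =>
    have hnofit : ∀ t ∈ pricing, ¬ (width ≤ t.1 ∧ height ≤ t.2.1) := by
      intro t ht
      exact (pvFindFit_none width height _).mp hA t
        ((PySem.List.mem_sorted pricing pvTupKey false t).mpr ht)
    have hfilter : pricing.filter (fun t => decide (width ≤ t.1) && decide (height ≤ t.2.1)) = [] := by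
      rw [List.filter_eq_nil_iff]
      intro t ht
      simp only [Bool.and_eq_true, decide_eq_true_eq, not_and]
      intro hw hh
      exact hnofit t ht ⟨hw, hh⟩
    have hb1 : (pricing.foldl (pvStep width height) (none, none)).1 = none := by
      rw [pvBest_factor, hfilter]
      rfl
    rw [hb1]
    match pricing with
    | [] => rfl
    | p :: rest =>
      obtain ⟨g, hg⟩ := pvMaxFold_some rest p
      have hfold : (p :: rest).foldl pvMaxStep none = some g := hg
      have hb2 : ((p :: rest).foldl (pvStep width height) (none, none)).2 = some g := by
        rw [pvBig_factor]
        exact hfold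
      rw [hb2]
      rw [pvMax?_map, hfold]
      simp only [Option.map_some]
      rw [pvLookup_of_maxfold _ g hfold]
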